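-- pv_equiv track=rewrite | github.com/migurski/Pure-Python-Geospatial-Export | ppge/__init__.py | _get_geometry_column_name
-- ===== SOURCE A (Python) =====
-- def _get_geometry_column_name(existing_columns: set) -> str:
--     """
--     Determine the name for the geometry column, avoiding conflicts.
--
--     Args:
--         existing_columns: Set of existing column names
--
--     Returns:
--         str: Name for the geometry column
--     """
--     if "geometry" not in existing_columns:
--         return "geometry"
--     elif "WKT" not in existing_columns:
--         return "WKT"
--     else:
--         # Find a unique name by appending numbers
--         counter = 1
--         while f"geometry_{counter}" in existing_columns:
--             counter += 1
--         return f"geometry_{counter}"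
-- ===== SOURCE B (Python) =====
-- def _get_geometry_column_name(existing_columns: set) -> str:
--     """Table-driven: build the ordered candidate table and its position index
--     once, mark which entries are taken in a single pass over the existing
--     columns, then return the candidate at the first unmarked position."""
--     cands = ["geometry", "WKT"] + [
--         f"geometry_{i}" for i in range(1, len(existing_columns) + 2)
--     ]
--     pos = {c: i for i, c in enumerate(cands)}
--     taken = [False] * len(cands)
--     for name in existing_columns:
--         i = pos.get(name)
--         if i is not None:
--             taken[i] = True
--     return cands[taken.index(False)]
-- ===== Notes on version B (the rewrite author's own statement) =====
-- stated objective: alternative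
-- what changed: Inverts A's control flow: instead of probing successive candidate names (if/elif branches, then a while loop testing membership per candidate), B builds the ordered candidate table and a name-to-position dictionary once, marks taken entries in a single pass over the existing columns, and returns the candidate at the first unmarked position.
import Mathlib
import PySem

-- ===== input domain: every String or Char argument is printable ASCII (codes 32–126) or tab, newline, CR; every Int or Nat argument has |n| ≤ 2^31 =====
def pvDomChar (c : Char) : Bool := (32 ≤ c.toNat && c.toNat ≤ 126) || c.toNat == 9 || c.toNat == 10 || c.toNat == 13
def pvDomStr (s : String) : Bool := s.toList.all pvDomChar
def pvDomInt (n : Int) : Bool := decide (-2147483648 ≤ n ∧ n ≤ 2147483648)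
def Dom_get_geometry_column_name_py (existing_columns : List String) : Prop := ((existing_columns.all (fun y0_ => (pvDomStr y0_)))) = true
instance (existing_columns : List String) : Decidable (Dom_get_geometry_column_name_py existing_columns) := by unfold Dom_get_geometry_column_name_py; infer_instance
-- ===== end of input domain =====

-- B replaces A's priority branches plus candidate-probing while loop by a table-driven
-- inversion: build the ordered candidate table once, mark which entries are taken in a
-- single pass over the columns, return the candidate at the first unmarked position
-- (objective: alternative decomposition, same return value).

-- ===== PORT A =====
-- A's unbounded while loop; the fuel (length + 1) only makes it total and is proved
-- sufficient in the lemmas below (the loop always exits before exhausting it).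
def pvLoopA (cols : List String) : Nat → Int → String
  | 0, c => "geometry_" ++ PySem.Int.toStr c
  | fuel+1, c =>
      if ("geometry_" ++ PySem.Int.toStr c) ∈ cols then pvLoopA cols fuel (c+1)
      else "geometry_" ++ PySem.Int.toStr c

def get_geometry_column_name_py (existing_columns : List String) : String :=
  if "geometry" ∉ existing_columns then "geometry"
  else if "WKT" ∉ existing_columns then "WKT"
  else pvLoopA existing_columns (existing_columns.length + 1) 1

-- ===== PORT B =====
-- pos = {c: i for i, c in enumerate(cands)}
def pvPos (cands : List String) : PySem.Dict String Int :=
  (PySem.List.enumerate cands 0).foldl (fun d p => d.insert p.2 p.1) PySem.Dict.empty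

def get_geometry_column_name_py_alt (existing_columns : List String) : String :=
  -- cands = ["geometry", "WKT"] + [f"geometry_{i}" for i in range(1, len(existing_columns) + 2)]
  let cands := ["geometry", "WKT"] ++
    (PySem.List.pyRange 1 ((existing_columns.length : Int) + 2) 1).map
      (fun i => "geometry_" ++ PySem.Int.toStr i)
  -- taken = [False] * len(cands)
  let taken0 := List.replicate cands.length false
  -- for name in existing_columns: i = pos.get(name); if i is not None: taken[i] = True
  let taken := existing_columns.foldl
    (fun t name =>
      match PySem.Dict.get? (pvPos cands) name with
      | some i => t.set i.toNat true
      | none => t) taken0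
  -- return cands[taken.index(False)]  (a False entry always exists, proved below;
  -- the none branch is unreachable -- there Python would raise ValueError)
  match PySem.List.index? taken false with
  | some k => cands.getD k ""
  | none => ""

-- ===== PRECONDITION & SPEC =====
def Spec_get_geometry_column_name_py (existing_columns : List String) (out : String) : Prop := out = get_geometry_column_name_py_alt existing_columns
instance (existing_columns : List String) (out : String) : Decidable (Spec_get_geometry_column_name_py existing_columns out) := by unfold Spec_get_geometry_column_name_py; infer_instance

-- ===== CLAIM (what is proved, stated in full; the proofs are below) =====
def Claim_equal_get_geometry_column_name_py : Prop := ∀ (existing_columns : List String), Dom_get_geometry_column_name_py existing_columns → Spec_get_geometry_column_name_py existing_columns (get_geometry_column_name_py existing_columns)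

-- ===== LEMMAS AND PROOFS =====

-- ---- decimal representation: Nat.repr is injective ----
theorem pv_digitChar_inj : ∀ m < 10, ∀ n < 10, Nat.digitChar m = Nat.digitChar n → m = n := by
  decide

-- str(n) as a recursion on n (most significant digits first)
def pvDigs (n : Nat) : List Char :=
  if _h : n < 10 then [Nat.digitChar n]
  else pvDigs (n / 10) ++ [Nat.digitChar (n % 10)]
  decreasing_by exact Nat.div_lt_self (by omega) (by omega)

theorem pvDigs_ne_nil (n : Nat) : pvDigs n ≠ [] := by
  rw [pvDigs]; split <;> simp

theorem pv_toDigitsCore_eq :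
    ∀ (f n : Nat) (acc : List Char), n < f →
      Nat.toDigitsCore 10 f n acc = pvDigs n ++ acc := by
  intro f
  induction f with
  | zero => intro n acc h; omega
  | succ f ih =>
      intro n acc h
      conv_lhs => rw [Nat.toDigitsCore]
      by_cases h10 : n / 10 = 0
      · rw [if_pos h10, pvDigs, dif_pos (by omega)]
        have hmn : n % 10 = n := Nat.mod_eq_of_lt (by omega)
        rw [hmn, List.singleton_append]
      · have hlt : n / 10 < f := by
          have h1 : n / 10 < n := Nat.div_lt_self (by omega) (by omega)
          omega
        rw [if_neg h10, ih (n / 10) _ hlt]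
        conv_rhs => rw [pvDigs]
        rw [dif_neg (show ¬ n < 10 by omega)]
        simp

theorem pv_repr_eq (n : Nat) : Nat.repr n = String.ofList (pvDigs n) := by
  show String.ofList (Nat.toDigitsCore 10 (n + 1) n []) = _
  rw [pv_toDigitsCore_eq (n + 1) n [] (by omega), List.append_nil]

theorem pvDigs_inj : ∀ m n : Nat, pvDigs m = pvDigs n → m = n := by
  intro m
  induction m using Nat.strong_induction_on with
  | _ m ih =>
      intro n h
      have em : ∀ k : Nat, k < 10 → pvDigs k = [Nat.digitChar k] := by
        intro k hk; rw [pvDigs]; rw [dif_pos hk]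
      have en : ∀ k : Nat, ¬ k < 10 →
          pvDigs k = pvDigs (k / 10) ++ [Nat.digitChar (k % 10)] := by
        intro k hk; rw [pvDigs]; rw [dif_neg hk]
      by_cases hm : m < 10 <;> by_cases hn : n < 10
      · rw [em m hm, em n hn] at h
        simp only [List.cons.injEq, and_true] at h
        exact pv_digitChar_inj m hm n hn h
      · rw [em m hm, en n hn] at h
        have := congrArg List.length h
        simp at this
        exact absurd this (pvDigs_ne_nil _)
      · rw [en m hm, em n hn] at h
        have := congrArg List.length (h.symm)
        simp at this
        exact absurd this (pvDigs_ne_nil _)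
      · rw [en m hm, en n hn] at h
        have h' : pvDigs (m / 10) = pvDigs (n / 10) ∧
            Nat.digitChar (m % 10) = Nat.digitChar (n % 10) := by simpa using h
        have hdiv : m / 10 = n / 10 :=
          ih (m / 10) (Nat.div_lt_self (by omega) (by omega)) (n / 10) h'.1
        have hmod : m % 10 = n % 10 :=
          pv_digitChar_inj (m % 10) (Nat.mod_lt _ (by omega)) (n % 10)
            (Nat.mod_lt _ (by omega)) h'.2
        have := Nat.div_add_mod m 10
        have := Nat.div_add_mod n 10
        omega

theorem pv_repr_inj {m n : Nat} (h : Nat.repr m = Nat.repr n) : m = n := by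
  rw [pv_repr_eq, pv_repr_eq] at h
  exact pvDigs_inj m n (String.ofList_injective h)

-- injectivity of the numbered candidate names
theorem pv_cand_inj {a b : Int} (ha : 0 ≤ a) (hb : 0 ≤ b)
    (h : "geometry_" ++ PySem.Int.toStr a = "geometry_" ++ PySem.Int.toStr b) : a = b := by
  have h1 : PySem.Int.toStr a = PySem.Int.toStr b := by
    have := congrArg String.toList h
    simp only [String.toList_append] at this
    exact String.toList_injective (List.append_cancel_left this)
  have ha' : a = ((a.toNat : Nat) : Int) := by omega
  have hb' : b = ((b.toNat : Nat) : Int) := by omega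
  rw [ha', hb'] at h1
  have h2 : Nat.repr a.toNat = Nat.repr b.toNat := h1
  have := pv_repr_inj h2
  omega

-- ---- the common characterisation: first candidate not among the columns ----
def pvFirstFree (cols : List String) : List String → Option String
  | [] => none
  | c :: cs => if c ∈ cols then pvFirstFree cols cs else some c

theorem pvFirstFree_eq_none_iff (cols : List String) :
    ∀ cs : List String, pvFirstFree cols cs = none ↔ ∀ c ∈ cs, c ∈ cols := by
  intro cs
  induction cs with
  | nil => simp [pvFirstFree]
  | cons c cs ih =>
      simp only [pvFirstFree]
      split
      · simp_all
      · simp_all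

-- A's loop is the first-free scan over the corresponding candidate range
theorem pvLoopA_eq_firstFree (cols : List String) :
    ∀ (fuel : Nat) (c : Int),
      pvLoopA cols fuel c =
        (pvFirstFree cols ((PySem.List.pyRange c (c + fuel) 1).map
            (fun i => "geometry_" ++ PySem.Int.toStr i))).getD
          ("geometry_" ++ PySem.Int.toStr (c + fuel)) := by
  intro fuel
  induction fuel with
  | zero =>
      intro c
      rw [PySem.List.pyRange_one_eq_nil (by omega)]
      simp [pvLoopA, pvFirstFree]
  | succ f ih =>
      intro c
      rw [PySem.List.pyRange_one_cons (by push_cast; omega)]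
      simp only [List.map_cons, pvFirstFree, pvLoopA]
      split
      · rw [ih (c + 1)]
        have : c + 1 + (f : Int) = c + ((f : Nat) + 1 : Nat) := by push_cast; ring
        rw [this]
      · simp

-- ---- the position index: get? is the (unique) index in the candidate table ----
theorem pv_pos_get? : ∀ (cands : List String), cands.Nodup → ∀ c : String,
    PySem.Dict.get? (pvPos cands) c
      = (PySem.List.index? cands c).map (fun k => ((k : Nat) : Int)) := by
  intro cands
  induction cands using List.reverseRecOn with
  | nil => intro _ c; simp [pvPos]
  | append_singleton l a ih =>
      intro hnd c
      have hnd' : l.Nodup ∧ a ∉ l := by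
        have h3 := List.nodup_append.mp hnd
        have hdis : ∀ b ∈ l, ¬ b = a := by simpa using h3.2.2
        exact ⟨h3.1, fun hm => hdis a hm rfl⟩
      have hpos : pvPos (l ++ [a]) = (pvPos l).insert a (0 + (l.length : Int)) := by
        unfold pvPos
        rw [PySem.List.enumerate_append, List.foldl_append]
        rfl
      rw [hpos, PySem.Dict.get?_insert]
      by_cases hc : c = a
      · subst hc
        rw [if_pos rfl, PySem.List.index?_append_singleton_self l c hnd'.2]
        simp
      · rw [if_neg hc, ih hnd'.1 c]
        by_cases hmem : c ∈ l
        · rw [PySem.List.index?_append_of_mem _ hmem]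
        · rw [(PySem.List.index?_eq_none_iff _ _).2 hmem,
            (PySem.List.index?_eq_none_iff _ _).2 (by simp [hmem, hc])]

-- ---- B's marking pass builds the membership table ----
theorem pv_mark_eq (cands : List String) (hnd : cands.Nodup) :
    ∀ (cols : List String) (g : String → Bool),
      cols.foldl (fun t name =>
          match PySem.Dict.get? (pvPos cands) name with
          | some i => t.set i.toNat true
          | none => t) (cands.map g)
        = cands.map (fun c => g c || decide (c ∈ cols)) := by
  intro cols
  induction cols with
  | nil => intro g; simp
  | cons x xs ih =>
      intro g
      simp only [List.foldl_cons]
      rw [pv_pos_get? cands hnd x]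
      cases hix : PySem.List.index? cands x with
      | none =>
          have hx : x ∉ cands := (PySem.List.index?_eq_none_iff _ _).1 hix
          simp only [Option.map_none]
          rw [ih g]
          apply List.map_congr_left
          intro c hcmem
          have : ¬ c = x := fun h => hx (h ▸ hcmem)
          simp [this]
      | some k =>
          simp only [Option.map_some]
          obtain ⟨hk, hck, _⟩ := PySem.List.getElem_of_index?_eq_some hix
          have hset : (cands.map g).set ((k : Int)).toNat true
              = cands.map (fun c => g c || (c == x)) := by
            apply List.ext_getElem
            · simp
            · intro j h1 h2
              rw [List.getElem_set]
              simp only [Int.toNat_natCast, List.getElem_map]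
              have hj : j < cands.length := by simpa using h2
              by_cases hjk : k = j
              · subst hjk
                rw [if_pos rfl, hck]
                simp
              · rw [if_neg hjk]
                have hne : cands[j] ≠ x := by
                  intro h
                  exact hjk ((List.Nodup.getElem_inj_iff hnd).mp (hck.trans h.symm))
                simp [hne]
          rw [hset, ih (fun c => g c || (c == x))]
          apply List.map_congr_left
          intro c _
          by_cases h1 : g c <;> by_cases h2 : c = x <;> by_cases h3 : c ∈ xs <;>
            simp [h1, h2, h3]

-- ---- the full candidate table has no duplicate names ----
theorem pv_num_ne_geometry (i : Int) : "geometry_" ++ PySem.Int.toStr i ≠ "geometry" := by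
  intro h
  have hlen := congrArg String.length h
  rw [String.length_append] at hlen
  have h9 : ("geometry_" : String).length = 9 := rfl
  have hl : ("geometry" : String).length = 8 := rfl
  omega

theorem pv_num_ne_wkt (i : Int) : "geometry_" ++ PySem.Int.toStr i ≠ "WKT" := by
  intro h
  have hlen := congrArg String.length h
  rw [String.length_append] at hlen
  have h9 : ("geometry_" : String).length = 9 := rfl
  have hl : ("WKT" : String).length = 3 := rfl
  omega

theorem pv_nums_nodup (b : Int) :
    (((PySem.List.pyRange 1 b 1).map
        (fun i => "geometry_" ++ PySem.Int.toStr i))).Nodup := by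
  refine List.Nodup.map_on ?_ (PySem.List.nodup_pyRange_one 1 _)
  intro a ha bb hb h
  have ha' : 1 ≤ a := ((PySem.List.mem_pyRange_one).1 ha).1
  have hb' : 1 ≤ bb := ((PySem.List.mem_pyRange_one).1 hb).1
  exact pv_cand_inj (by omega) (by omega) h

theorem pv_cands_nodup (b : Int) :
    (["geometry", "WKT"] ++ (PySem.List.pyRange 1 b 1).map
        (fun i => "geometry_" ++ PySem.Int.toStr i)).Nodup := by
  simp only [List.cons_append, List.nil_append, List.nodup_cons]
  refine ⟨?_, ?_, pv_nums_nodup b⟩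
  · simp only [List.mem_cons, List.mem_map]
    rintro (h | ⟨i, -, h⟩)
    · exact absurd h.symm (by decide)
    · exact pv_num_ne_geometry i h
  · simp only [List.mem_map]
    rintro ⟨i, -, h⟩
    exact pv_num_ne_wkt i h

-- the positional read-off equals the first-free scan
theorem pv_index_firstFree (cols : List String) :
    ∀ cs : List String,
      (match PySem.List.index? (cs.map (fun c => decide (c ∈ cols))) false with
       | some k => cs.getD k ""
       | none => "") = (pvFirstFree cols cs).getD "" := by
  intro cs
  induction cs with
  | nil => rfl
  | cons c cs ih =>
      simp only [List.map_cons, pvFirstFree]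
      by_cases h : c ∈ cols
      · rw [PySem.List.index?_cons_of_ne _ (by simp [h])]
        rw [if_pos h]
        rw [← ih]
        cases PySem.List.index? (cs.map (fun c => decide (c ∈ cols))) false with
        | none => rfl
        | some k => simp
      · rw [show (decide (c ∈ cols)) = false by simp [h], PySem.List.index?_cons_self]
        simp [h]

-- B computes the first-free scan over its candidate table
theorem pv_alt_eq_firstFree (cols : List String) :
    get_geometry_column_name_py_alt cols =
      (pvFirstFree cols (["geometry", "WKT"] ++
        (PySem.List.pyRange 1 ((cols.length : Int) + 2) 1).map
          (fun i => "geometry_" ++ PySem.Int.toStr i))).getD "" := by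
  unfold get_geometry_column_name_py_alt
  simp only []
  rw [show (List.replicate (["geometry", "WKT"] ++
        (PySem.List.pyRange 1 ((cols.length : Int) + 2) 1).map
          (fun i => "geometry_" ++ PySem.Int.toStr i)).length false)
      = ((["geometry", "WKT"] ++
        (PySem.List.pyRange 1 ((cols.length : Int) + 2) 1).map
          (fun i => "geometry_" ++ PySem.Int.toStr i)).map (fun _ => false)) by
      rw [List.map_const']]
  rw [pv_mark_eq _ (pv_cands_nodup _) cols]
  simp only [Bool.false_or]
  exact pv_index_firstFree cols _

-- the numbered part of the table always contains a free name
theorem pv_exists_free (cols : List String) :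
    pvFirstFree cols
        ((PySem.List.pyRange 1 ((cols.length : Int) + 2) 1).map
          (fun i => "geometry_" ++ PySem.Int.toStr i)) ≠ none := by
  intro hnone
  rw [pvFirstFree_eq_none_iff] at hnone
  set nums := (PySem.List.pyRange 1 ((cols.length : Int) + 2) 1).map
      (fun i => "geometry_" ++ PySem.Int.toStr i) with hnums
  have hnodup : nums.Nodup := hnums ▸ pv_nums_nodup _
  have hlen : nums.length = cols.length + 1 := by
    rw [hnums]
    rw [List.length_map, PySem.List.length_pyRange_one]
    omega
  have hsub : nums ⊆ cols := fun c hc => hnone c hc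
  have : nums.length ≤ cols.length := by
    calc nums.length = nums.toFinset.card := (List.toFinset_card_of_nodup hnodup).symm
      _ ≤ cols.toFinset.card := Finset.card_le_card (by
          intro x hx; simp only [List.mem_toFinset] at *; exact hsub hx)
      _ ≤ cols.length := cols.toFinset_card_le
  omega

-- ===== VERDICT (by name: the statement is the Claim_ definition above) =====
theorem get_geometry_column_name_py_spec : Claim_equal_get_geometry_column_name_py := by
  intro cols _
  show get_geometry_column_name_py cols = get_geometry_column_name_py_alt cols
  rw [pv_alt_eq_firstFree]
  unfold get_geometry_column_name_py
  by_cases h1 : "geometry" ∈ cols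
  · by_cases h2 : "WKT" ∈ cols
    · rw [if_neg (by simpa using h1), if_neg (by simpa using h2)]
      simp only [List.cons_append, List.nil_append, pvFirstFree, if_pos h1, if_pos h2]
      rw [pvLoopA_eq_firstFree]
      obtain ⟨s, hs⟩ := Option.ne_none_iff_exists'.1 (pv_exists_free cols)
      have hrange : (1 : Int) + ((cols.length + 1 : Nat) : Int) = (cols.length : Int) + 2 := by
        push_cast; ring
      rw [hrange, hs]
      rfl
    · rw [if_neg (by simpa using h1), if_pos (by simpa using h2)]
      simp [pvFirstFree, h1, h2]
  · rw [if_pos (by simpa using h1)]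
    simp [pvFirstFree, h1]
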